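-- pv_equiv track=rewrite | github.com/Alceec/Projet-BACAR-32 | Central Unit/Main Architecture/path_detector.py | computated_values
-- ===== SOURCE A (Python) =====
-- def computated_values(valc, interval, num):
--     """ cherche le milieu des routes et renvoie l'indexation i de ceux-ci
--     pour connaître leurs coordonnées xy à partir de sample_circle"""
--     i = -1
--     i_sort = []
--     while num > i+1:
--         count = 1
--         i += 1
--         if valc[i] == 0:
--             j = i
--             while num > j+1 and 0 == valc[j+1]:
--                 count += 1
--                 j += 1
--             if count*interval >= 8 :
--                 i_moyen = int(i+count/2)
--                 i_sort += [i_moyen]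
--             i += count
--     return i_sort
-- ===== SOURCE B (Python) =====
-- def computated_values(valc, interval, num):
--     # Barrier method: collect the positions of nonzero entries in valc[:num],
--     # bracket them with sentinels -1 and n; each adjacent barrier pair (a, b)
--     # encloses a gap of b-a-1 zeros starting at a+1; emit the gap midpoints.
--     n = max(num, 0)
--     barriers = [-1] + [i for i in range(n) if valc[i] != 0] + [n]
--     out = []
--     for a, b in zip(barriers, barriers[1:]):
--         gap = b - a - 1
--         if 0 < gap and gap * interval >= 8:
--             out.append((a + 1) + gap // 2)
--     return out
-- ===== Notes on version B (the rewrite author's own statement) =====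
-- stated objective: alternative
-- what changed: replaces A's stateful run-counting (outer while with i jumping plus an inner zero-counting while) by the barrier method: collect the nonzero positions bracketed by sentinels -1 and n, then read each zero-gap and its midpoint off adjacent barrier pairs via zip
import Mathlib
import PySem

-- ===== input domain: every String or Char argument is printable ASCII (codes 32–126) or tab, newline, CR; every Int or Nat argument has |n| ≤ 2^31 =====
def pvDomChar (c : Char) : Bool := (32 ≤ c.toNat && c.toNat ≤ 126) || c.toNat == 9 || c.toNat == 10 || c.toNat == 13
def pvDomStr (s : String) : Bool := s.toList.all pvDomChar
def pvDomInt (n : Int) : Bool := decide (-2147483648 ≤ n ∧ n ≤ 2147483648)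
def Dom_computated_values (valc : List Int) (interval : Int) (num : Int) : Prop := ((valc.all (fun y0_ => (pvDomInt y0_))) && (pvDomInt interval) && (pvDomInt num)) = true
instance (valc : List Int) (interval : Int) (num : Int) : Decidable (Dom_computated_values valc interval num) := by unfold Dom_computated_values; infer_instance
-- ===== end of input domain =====

-- B replaces A's index-jumping run-counting loops by the barrier method: list the
-- nonzero positions with sentinels, then read each gap off an adjacent pair (objective: alternative).

-- ===== PORT A =====
-- termination measures of the two while loops (named so the recursion sites stay small)
theorem pvMeasureInner (num j : Int) (h : num > j + 1) :
    (num - (j + 1 + 1)).toNat < (num - (j + 1)).toNat := by omega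

theorem pvMeasureOuter (num i c : Int) (h : num > i + 1) (hc : 1 ≤ c) :
    (num - (i + 1 + c + 1)).toNat < (num - (i + 1)).toNat := by omega

-- the inner `while num > j+1 and 0 == valc[j+1]` loop; state (j, count)
def aInner (valc : List Int) (num : Int) (j : Int) (count : Int) : Int × Int :=
  if h : num > j + 1 ∧ (PySem.List.pyGet? valc (j + 1)).getD 1 = 0 then
    aInner valc num (j + 1) (count + 1)
  else (j, count)
termination_by (num - (j + 1)).toNat
decreasing_by exact pvMeasureInner num j h.1

theorem aInner_snd_ge (valc : List Int) (num : Int) (j count : Int) :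
    count ≤ (aInner valc num j count).2 := by
  fun_induction aInner with
  | case1 j count h ih => omega
  | case2 j count h => simp

-- the outer `while num > i+1` loop; acc = i_sort
def aOuter (valc : List Int) (interval : Int) (num : Int) (i : Int) (acc : List Int) : List Int :=
  if h : num > i + 1 then
    -- count = 1; i += 1
    if (PySem.List.pyGet? valc (i + 1)).getD 1 = 0 then
      let p := aInner valc num (i + 1) 1
      -- `int(i+count/2)`: i ≥ 0 here, so float truncation = floor division, exact
      let acc1 := if p.2 * interval ≥ 8 then acc ++ [(i + 1) + PySem.Int.floordiv p.2 2] else acc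
      aOuter valc interval num ((i + 1) + p.2) acc1
    else
      aOuter valc interval num (i + 1) acc
  else acc
termination_by (num - (i + 1)).toNat
decreasing_by
  · exact pvMeasureOuter num i p.2 h (aInner_snd_ge valc num (i + 1) 1)
  · exact pvMeasureInner num i h

def computated_values (valc : List Int) (interval : Int) (num : Int) : List Int :=
  aOuter valc interval num (-1) []

-- ===== PORT B =====
-- barriers = [-1] + [i for i in range(n) if valc[i] != 0] + [n]; then one loop over zip(barriers, barriers[1:])
def computated_values_alt (valc : List Int) (interval : Int) (num : Int) : List Int :=
  let n : Int := max num 0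
  let barriers : List Int :=
    [-1] ++ ((List.range n.toNat).map (fun (k : Nat) => (k : Int))).filter
      (fun i => (PySem.List.pyGet? valc i).getD 1 ≠ 0) ++ [n]
  (barriers.zip barriers.tail).foldl (fun acc p =>
    let gap := p.2 - p.1 - 1
    -- `(a + 1) + gap // 2` ports A's `int(i+count/2)` exactly on the emitted (positive) gaps
    if 0 < gap ∧ 8 ≤ gap * interval then acc ++ [(p.1 + 1) + PySem.Int.floordiv gap 2] else acc) []

-- ===== PRECONDITION & SPEC =====
-- Pre_ excludes exactly the inputs where Python raises IndexError: num larger than len(valc)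
def Pre_computated_values (valc : List Int) (interval : Int) (num : Int) : Prop :=
  num ≤ (valc.length : Int)
instance (valc : List Int) (interval : Int) (num : Int) : Decidable (Pre_computated_values valc interval num) := by unfold Pre_computated_values; infer_instance

def pvWitness_computated_values : List Int × Int × Int := ([0, 0, 0, 0, 1, 0], 3, 6)

def Spec_computated_values (valc : List Int) (interval : Int) (num : Int) (out : List Int) : Prop := out = computated_values_alt valc interval num
instance (valc : List Int) (interval : Int) (num : Int) (out : List Int) : Decidable (Spec_computated_values valc interval num out) := by unfold Spec_computated_values; infer_instance

-- ===== CLAIM (what is proved, stated in full; the proofs are below) =====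
def Claim_equal_computated_values : Prop := ∀ (valc : List Int) (interval : Int) (num : Int), Dom_computated_values valc interval num → Pre_computated_values valc interval num → Spec_computated_values valc interval num (computated_values valc interval num)

-- ===== LEMMAS AND PROOFS =====

-- what one adjacent barrier pair contributes
def emitP (interval : Int) (p : Int × Int) : List Int :=
  if 0 < p.2 - p.1 - 1 ∧ 8 ≤ (p.2 - p.1 - 1) * interval
  then [(p.1 + 1) + PySem.Int.floordiv (p.2 - p.1 - 1) 2] else []

-- recursive rendering of B's result, scanning from index k with last barrier a (proof device)
def G (valc : List Int) (interval n k a : Int) : List Int :=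
  if h : k < n then
    if (PySem.List.pyGet? valc k).getD 1 ≠ 0 then emitP interval (a, k) ++ G valc interval n (k + 1) k
    else G valc interval n (k + 1) a
  else emitP interval (a, n)
termination_by (n - k).toNat
decreasing_by all_goals omega

-- recursive rendering of the filtered barrier list
def bar (valc : List Int) (n k : Int) : List Int :=
  if h : k < n then
    if (PySem.List.pyGet? valc k).getD 1 ≠ 0 then k :: bar valc n (k + 1) else bar valc n (k + 1)
  else []
termination_by (n - k).toNat
decreasing_by all_goals omega

-- chained emission over a barrier list ending at sentinel n
def chain (interval n a : Int) (l : List Int) : List Int :=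
  match l with
  | [] => emitP interval (a, n)
  | b :: rest => emitP interval (a, b) ++ chain interval n b rest

theorem emitP_eq (interval a b : Int) (h : a < b) :
    emitP interval (a, b) = if 8 ≤ (b - a - 1) * interval
      then [(a + 1) + PySem.Int.floordiv (b - a - 1) 2] else [] := by
  simp only [emitP]
  rcases eq_or_lt_of_le (show a + 1 ≤ b by omega) with he | hlt
  · rw [show b - a - 1 = 0 from by omega]
    simp
  · by_cases hc : 8 ≤ (b - a - 1) * interval
    · rw [if_pos ⟨by omega, hc⟩, if_pos hc]
    · rw [if_neg (fun hh => hc hh.2), if_neg hc]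

theorem foldl_step_eq (interval : Int) (l : List (Int × Int)) (acc : List Int) :
    l.foldl (fun acc p =>
      let gap := p.2 - p.1 - 1
      if 0 < gap ∧ 8 ≤ gap * interval then acc ++ [(p.1 + 1) + PySem.Int.floordiv gap 2] else acc) acc
    = acc ++ l.flatMap (emitP interval) := by
  induction l generalizing acc with
  | nil => simp
  | cons p rest ih =>
    simp only [List.foldl_cons, ih, List.flatMap_cons, emitP]
    split_ifs <;> simp

theorem zip_chain (interval n : Int) (l : List Int) :
    ∀ a : Int, ((a :: (l ++ [n])).zip (l ++ [n])).flatMap (emitP interval) = chain interval n a l := by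
  induction l with
  | nil => intro a; simp [chain]
  | cons b rest ih => intro a; simp only [List.cons_append, List.zip_cons_cons,
      List.flatMap_cons, ih b, chain]

theorem filter_range_bar (valc : List Int) (n : Int) (m : Nat) :
    ∀ k : Nat, ((k : Nat) : Int) + m = n →
      (((List.range' k m).map (fun (j : Nat) => (j : Int))).filter
        (fun i => (PySem.List.pyGet? valc i).getD 1 ≠ 0)) = bar valc n k := by
  induction m with
  | zero =>
    intro k hk
    rw [bar, dif_neg (show ¬ ((k : Nat) : Int) < n by push_cast at hk; omega)]
    simp
  | succ m ih =>
    intro k hk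
    rw [List.range'_succ, bar, dif_pos (show ((k : Nat) : Int) < n by push_cast at hk; omega)]
    rw [List.map_cons, List.filter_cons]
    have ih' := ih (k + 1) (by push_cast at hk ⊢; omega)
    rw [show (((k + 1 : Nat)) : Int) = ((k : Nat) : Int) + 1 from by push_cast; ring] at ih'
    rw [ih']
    rcases eq_or_ne ((PySem.List.pyGet? valc ((k : Nat) : Int)).getD 1) 0 with hz | hz
    · rw [if_neg (by simpa using hz), if_neg (by simpa using hz)]
    · rw [if_pos (by simpa using hz), if_pos hz]

theorem chain_bar (valc : List Int) (interval n k : Int) :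
    ∀ a : Int, chain interval n a (bar valc n k) = G valc interval n k a := by
  fun_induction bar valc n k with
  | case1 k h hz ih =>
    intro a
    rw [G, dif_pos h, if_pos hz, chain, ih]
  | case2 k h hz ih =>
    intro a
    rw [G, dif_pos h, if_neg hz, ih]
  | case3 k h =>
    intro a
    rw [G, dif_neg h, chain]

theorem alt_eq_G (valc : List Int) (interval num : Int) :
    computated_values_alt valc interval num = G valc interval (max num 0) 0 (-1) := by
  simp only [computated_values_alt, List.cons_append, List.nil_append, List.tail_cons]
  rw [foldl_step_eq, List.nil_append, zip_chain]
  rw [List.range_eq_range']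
  rw [filter_range_bar valc (max num 0) ((max num 0).toNat) 0 (by push_cast; omega), chain_bar]
  norm_num

theorem aOuter_prepend (valc : List Int) (interval num : Int) (i : Int) (acc : List Int) :
    ∀ X : List Int, aOuter valc interval num i (X ++ acc) = X ++ aOuter valc interval num i acc := by
  fun_induction aOuter valc interval num i acc with
  | case1 i acc h hz p acc1 ih =>
    intro X
    conv_lhs => rw [aOuter]
    simp only [h, dif_pos, hz, if_pos]
    split_ifs with hc
    · have h2 := ih X
      simpa [acc1, p, hc, List.append_assoc] using h2
    · have h2 := ih X
      simpa [acc1, p, hc] using h2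
  | case2 i acc h hz ih =>
    intro X
    conv_lhs => rw [aOuter]
    simp only [h, dif_pos, hz, reduceIte]
    exact ih X
  | case3 i acc h =>
    intro X
    conv_lhs => rw [aOuter]
    simp [h]

theorem aOuter_acc (valc : List Int) (interval num : Int) (i : Int) (acc : List Int) :
    aOuter valc interval num i acc = acc ++ aOuter valc interval num i [] := by
  simpa using aOuter_prepend valc interval num i [] acc

-- main mutual induction: A's outer loop vs B's barrier scan (strong induction on a joint measure)
theorem main_eq (valc : List Int) (interval num : Int) :
    ∀ t : Nat,
      (∀ k : Int, 0 ≤ k → (num - k + 1).toNat ≤ t →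
        aOuter valc interval num (k - 1) [] = G valc interval (max num 0) k (k - 1)) ∧
      (∀ j s : Int, 0 ≤ s → s ≤ j → j + 1 ≤ num → (num - j).toNat ≤ t →
        ((if (aInner valc num j (j + 1 - s)).2 * interval ≥ 8 then
            [s + PySem.Int.floordiv (aInner valc num j (j + 1 - s)).2 2] else []) ++
          aOuter valc interval num (s + (aInner valc num j (j + 1 - s)).2) [])
          = G valc interval (max num 0) (j + 1) (s - 1)) := by
  intro t
  induction t using Nat.strong_induction_on with
  | _ t IH =>
  constructor
  · -- P1: the outer loop about to look at index k, last barrier k-1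
    intro k hk ht
    by_cases hlt : num > k
    · conv_lhs => rw [aOuter]
      rw [G, dif_pos (show k < max num 0 by omega)]
      rw [dif_pos (show num > k - 1 + 1 by omega)]
      simp only [sub_add_cancel]
      by_cases hz : (PySem.List.pyGet? valc k).getD 1 = 0
      · simp only [hz, if_pos, if_neg (show ¬ ((0:Int)) ≠ 0 from by simp)]
        have hP2 := ((IH (t - 1) (by omega)).2) k k hk le_rfl (by omega) (by omega)
        simp only [add_sub_cancel_left] at hP2
        rw [aOuter_acc, ← hP2]
        split_ifs with hc <;> simp
      · simp only [hz, reduceIte]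
        rw [if_pos (show (PySem.List.pyGet? valc k).getD 1 ≠ 0 from hz)]
        have hP1 := ((IH (t - 1) (by omega)).1) (k + 1) (by omega) (by omega)
        simp only [add_sub_cancel_right] at hP1
        rw [← hP1]
        rw [show emitP interval (k - 1, k) = [] from by
          simp only [emitP]; rw [if_neg]; rintro ⟨h1, -⟩; omega]
        rw [List.nil_append]
    · conv_lhs => rw [aOuter]
      rw [G, dif_neg (show ¬ k < max num 0 by omega)]
      rw [dif_neg (show ¬ num > k - 1 + 1 by omega)]
      have : emitP interval (k - 1, max num 0) = [] := by
        simp only [emitP]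
        rw [if_neg]
        rintro ⟨h1, -⟩
        omega
      rw [this]
  · -- P2: the inner zero-counting loop, run started at s, about to look at index j+1
    intro j s hs hsj hjnum ht
    rw [aInner]
    by_cases hcond : num > j + 1 ∧ (PySem.List.pyGet? valc (j + 1)).getD 1 = 0
    · rw [dif_pos hcond]
      rw [G, dif_pos (show j + 1 < max num 0 by omega)]
      rw [if_neg (show ¬ (PySem.List.pyGet? valc (j + 1)).getD 1 ≠ 0 from by simpa using hcond.2)]
      have hP2 := ((IH (t - 1) (by omega)).2) (j + 1) s hs (by omega) (by omega) (by omega)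
      rw [show j + 1 - s + 1 = j + 1 + 1 - s from by ring]
      exact hP2
    · rw [dif_neg hcond]
      simp only
      rw [show s + (j + 1 - s) = j + 1 from by ring]
      by_cases hj : j + 1 < num
      · have hz1 : (PySem.List.pyGet? valc (j + 1)).getD 1 ≠ 0 := fun hz => hcond ⟨hj, hz⟩
        rw [G, dif_pos (show j + 1 < max num 0 by omega), if_pos hz1]
        have hP1 := ((IH (t - 1) (by omega)).1) (j + 1 + 1) (by omega) (by omega)
        simp only [add_sub_cancel_right] at hP1
        rw [← hP1]
        have hemit : emitP interval (s - 1, j + 1) =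
            if (j + 1 - s) * interval ≥ 8 then [s + PySem.Int.floordiv (j + 1 - s) 2] else [] := by
          rw [emitP_eq interval (s - 1) (j + 1) (by omega),
            show j + 1 - (s - 1) - 1 = j + 1 - s from by ring,
            show s - 1 + 1 = s from by ring]
        rw [hemit]
      · have hje : j + 1 = num := by omega
        rw [G, dif_neg (show ¬ j + 1 < max num 0 by omega)]
        rw [show aOuter valc interval num (j + 1) [] = [] from by
          rw [aOuter, dif_neg (show ¬ num > j + 1 + 1 by omega)]]
        rw [List.append_nil]
        rw [show max num 0 = j + 1 from by omega]
        rw [emitP_eq interval (s - 1) (j + 1) (by omega),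
          show j + 1 - (s - 1) - 1 = j + 1 - s from by ring,
          show s - 1 + 1 = s from by ring]

-- ===== VERDICT (by name: the statement is the Claim_ definition above) =====
theorem computated_values_spec : Claim_equal_computated_values := by
  intro valc interval num _ _
  unfold Spec_computated_values computated_values
  rw [alt_eq_G]
  have h := (main_eq valc interval num (num - 0 + 1).toNat).1 0 le_rfl le_rfl
  simpa using h
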